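-- pv_equiv track=rewrite | github.com/ilya-aby/advent-of-code-2023 | D11/d11p2.py | expand_map
-- ===== SOURCE A (Python) =====
-- def expand_map(expansion_factor: int, star_map: list[list[str]]) -> tuple[list[int], list[int]]:
--     """
--     Expands the star map by creating row/col arrays to store expansion factor for each row/col that
--     doesn't contain a galaxy. Stores 1 for each row/col that contains a galaxy and does not need to
--     be expanded
--     """
--     row_expansions = []
--     col_expansions = []
--
--     for row in star_map:
--         if '#' not in row:
--             row_expansions.append(expansion_factor)
--         else:
--             row_expansions.append(1)
--
--     for col in range(len(star_map[0])):
--         if '#' not in [row[col] for row in star_map]: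
--             col_expansions.append(expansion_factor)
--         else:
--             col_expansions.append(1)
--
--     return row_expansions, col_expansions
-- ===== SOURCE B (Python) =====
-- def expand_map(expansion_factor: int, star_map: list[list[str]]) -> tuple[list[int], list[int]]:
--     """Single index-collecting pass, then two cheap lookup loops."""
--     rows_with_galaxy = set()
--     cols_with_galaxy = set()
--     for r, row in enumerate(star_map):
--         for c, cell in enumerate(row):
--             if cell == '#':
--                 rows_with_galaxy.add(r)
--                 cols_with_galaxy.add(c)
--     row_expansions = [1 if r in rows_with_galaxy else expansion_factor
--                       for r in range(len(star_map))]
--     col_expansions = [1 if c in cols_with_galaxy else expansion_factor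
--                       for c in range(len(star_map[0]))]
--     return row_expansions, col_expansions
-- ===== Notes on version B (the rewrite author's own statement) =====
-- stated objective: faster
-- what changed: A rebuilds a fresh column list for every column (a nested per-column membership scan); B makes one index-collecting pass storing rows_with_galaxy/cols_with_galaxy sets and then fills both expansion tables by cheap set-membership lookups.
import Mathlib
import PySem

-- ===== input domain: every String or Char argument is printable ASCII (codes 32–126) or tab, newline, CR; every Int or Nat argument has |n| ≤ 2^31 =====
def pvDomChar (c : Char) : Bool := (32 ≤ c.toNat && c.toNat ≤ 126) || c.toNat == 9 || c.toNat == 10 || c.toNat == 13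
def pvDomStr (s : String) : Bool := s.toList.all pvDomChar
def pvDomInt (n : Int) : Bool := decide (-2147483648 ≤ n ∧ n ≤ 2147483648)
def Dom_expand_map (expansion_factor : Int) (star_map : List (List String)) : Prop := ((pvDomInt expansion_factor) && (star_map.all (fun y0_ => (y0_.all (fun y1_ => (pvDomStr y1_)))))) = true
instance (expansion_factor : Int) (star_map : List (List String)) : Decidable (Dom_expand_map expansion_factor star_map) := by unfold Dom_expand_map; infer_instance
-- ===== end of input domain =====

-- B replaces A's per-column list rebuild by one index-collecting pass (two sets) plus two lookup loops (measured faster by a constant factor).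

-- ===== PORT A =====
def expand_map (expansion_factor : Int) (star_map : List (List String)) : List Int × List Int :=
  let row_expansions : List Int :=
    star_map.foldl (fun acc row => if ¬ ("#" ∈ row) then acc ++ [expansion_factor] else acc ++ [(1 : Int)]) []
  -- star_map[0]: Python raises IndexError on empty star_map; Pre_ excludes it, so getD [] is exact on Pre_.
  let first_row : List String := (PySem.List.pyGet? star_map 0).getD []
  -- row[col]: Python raises IndexError if some row is shorter than row 0; Pre_ excludes that, so getD "" is exact on Pre_.
  let col_expansions : List Int :=
    (PySem.List.pyRange 0 (first_row.length : Int)).foldl (fun acc col =>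
      if ¬ ("#" ∈ star_map.map (fun row => (PySem.List.pyGet? row col).getD "")) then acc ++ [expansion_factor]
      else acc ++ [(1 : Int)]) []
  (row_expansions, col_expansions)

-- ===== PORT B =====
def expand_map_alt (expansion_factor : Int) (star_map : List (List String)) : List Int × List Int :=
  let sets : PySem.Set Int × PySem.Set Int :=
    (PySem.List.enumerate star_map).foldl
      (fun s rp =>
        (PySem.List.enumerate rp.2).foldl
          (fun s cc => if cc.2 == "#" then (PySem.Set.add s.1 rp.1, PySem.Set.add s.2 cc.1) else s) s)
      (PySem.Set.empty, PySem.Set.empty)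
  let row_expansions : List Int :=
    (PySem.List.pyRange 0 (star_map.length : Int)).map
      (fun r => if PySem.Set.contains sets.1 r then (1 : Int) else expansion_factor)
  let col_expansions : List Int :=
    (PySem.List.pyRange 0 ((((PySem.List.pyGet? star_map 0).getD []).length : Int))).map
      (fun c => if PySem.Set.contains sets.2 c then (1 : Int) else expansion_factor)
  (row_expansions, col_expansions)

-- ===== PRECONDITION & SPEC =====
-- Pre_ excludes exactly the inputs on which A raises IndexError: the empty star_map (star_map[0])
-- and jagged maps where some row is shorter than row 0 (row[col]).
def Pre_expand_map (expansion_factor : Int) (star_map : List (List String)) : Prop :=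
  star_map ≠ [] ∧ ∀ row ∈ star_map, (star_map.headD []).length ≤ row.length
instance (expansion_factor : Int) (star_map : List (List String)) : Decidable (Pre_expand_map expansion_factor star_map) := by unfold Pre_expand_map; infer_instance
def pvWitness_expand_map : Int × List (List String) := (7, [["#", "."], [".", "."]])

def Spec_expand_map (expansion_factor : Int) (star_map : List (List String)) (out : List Int × List Int) : Prop := out = expand_map_alt expansion_factor star_map
instance (expansion_factor : Int) (star_map : List (List String)) (out : List Int × List Int) : Decidable (Spec_expand_map expansion_factor star_map out) := by unfold Spec_expand_map; infer_instance

-- ===== CLAIM (what is proved, stated in full; the proofs are below) =====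
def Claim_equal_expand_map : Prop := ∀ (expansion_factor : Int) (star_map : List (List String)), Dom_expand_map expansion_factor star_map → Pre_expand_map expansion_factor star_map → Spec_expand_map expansion_factor star_map (expand_map expansion_factor star_map)

-- ===== LEMMAS AND PROOFS =====

-- the inner per-row loop of B, named for the lemmas below
def pvInner (r : Int) (s : PySem.Set Int × PySem.Set Int) (l : List (Int × String)) :
    PySem.Set Int × PySem.Set Int :=
  l.foldl (fun s cc => if cc.2 == "#" then (PySem.Set.add s.1 r, PySem.Set.add s.2 cc.1) else s) s

lemma mem1_inner (r : Int) (l : List (Int × String)) (s : PySem.Set Int × PySem.Set Int) (x : Int) :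
    x ∈ (pvInner r s l).1 ↔ x ∈ s.1 ∨ (x = r ∧ ∃ cc ∈ l, cc.2 = "#") := by
  induction l generalizing s with
  | nil => simp [pvInner]
  | cons cc t ih =>
    simp only [pvInner, List.foldl_cons] at *
    rw [ih]
    by_cases h : cc.2 = "#" <;>
      simp [h, PySem.Set.mem_add] <;> tauto

lemma mem2_inner (r : Int) (l : List (Int × String)) (s : PySem.Set Int × PySem.Set Int) (x : Int) :
    x ∈ (pvInner r s l).2 ↔ x ∈ s.2 ∨ ∃ cc ∈ l, cc.2 = "#" ∧ x = cc.1 := by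
  induction l generalizing s with
  | nil => simp [pvInner]
  | cons cc t ih =>
    simp only [pvInner, List.foldl_cons] at *
    rw [ih]
    by_cases h : cc.2 = "#" <;>
      simp [h, PySem.Set.mem_add] <;> tauto

-- the outer loop of B
def pvOuter (L : List (Int × List String)) (s : PySem.Set Int × PySem.Set Int) :
    PySem.Set Int × PySem.Set Int :=
  L.foldl (fun s rp => pvInner rp.1 s (PySem.List.enumerate rp.2)) s

lemma mem1_outer (L : List (Int × List String)) (s : PySem.Set Int × PySem.Set Int) (x : Int) :
    x ∈ (pvOuter L s).1 ↔ x ∈ s.1 ∨ ∃ rp ∈ L, x = rp.1 ∧ ∃ cc ∈ PySem.List.enumerate rp.2, cc.2 = "#" := by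
  induction L generalizing s with
  | nil => simp [pvOuter]
  | cons rp t ih =>
    simp only [pvOuter, List.foldl_cons] at *
    rw [ih, mem1_inner]
    simp; tauto

lemma mem2_outer (L : List (Int × List String)) (s : PySem.Set Int × PySem.Set Int) (x : Int) :
    x ∈ (pvOuter L s).2 ↔ x ∈ s.2 ∨ ∃ rp ∈ L, ∃ cc ∈ PySem.List.enumerate rp.2, cc.2 = "#" ∧ x = cc.1 := by
  induction L generalizing s with
  | nil => simp [pvOuter]
  | cons rp t ih =>
    simp only [pvOuter, List.foldl_cons] at *
    rw [ih, mem2_inner]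
    simp; tauto

lemma S1_spec (sm : List (List String)) (i : Nat) (hi : i < sm.length) :
    ((i : Int) ∈ (pvOuter (PySem.List.enumerate sm) (PySem.Set.empty, PySem.Set.empty)).1) ↔ "#" ∈ sm[i] := by
  rw [mem1_outer]
  constructor
  · rintro (h | ⟨rp, hrp, hx, cc, hcc, hc2⟩)
    · simp [PySem.Set.empty] at h
    · obtain ⟨k, hk, rfl⟩ := (PySem.List.mem_enumerate_iff _ _ _).1 hrp
      simp only [zero_add] at hx
      have : k = i := by exact_mod_cast hx.symm
      subst this
      obtain ⟨j, hj, rfl⟩ := (PySem.List.mem_enumerate_iff _ _ _).1 hcc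
      have hval : sm[k][j] = "#" := hc2
      exact hval ▸ List.getElem_mem hj
  · intro hm
    obtain ⟨j, hj, hjeq⟩ := List.mem_iff_getElem.1 hm
    refine Or.inr ⟨((i : Int), sm[i]), ?_, rfl, ((j : Int), sm[i][j]), ?_, hjeq⟩
    · exact (PySem.List.mem_enumerate_iff _ _ _).2 ⟨i, hi, by simp⟩
    · exact (PySem.List.mem_enumerate_iff _ _ _).2 ⟨j, hj, by simp⟩

lemma S2_spec (sm : List (List String)) (n0 : Nat) (hrect : ∀ row ∈ sm, n0 ≤ row.length)
    (c : Nat) (hc : c < n0) :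
    ((c : Int) ∈ (pvOuter (PySem.List.enumerate sm) (PySem.Set.empty, PySem.Set.empty)).2) ↔
      "#" ∈ sm.map (fun row => (PySem.List.pyGet? row (c : Int)).getD "") := by
  rw [mem2_outer]
  simp only [List.mem_map]
  constructor
  · rintro (h | ⟨rp, hrp, cc, hcc, hc2, hx⟩)
    · simp [PySem.Set.empty] at h
    · obtain ⟨k, hk, rfl⟩ := (PySem.List.mem_enumerate_iff _ _ _).1 hrp
      obtain ⟨j, hj, rfl⟩ := (PySem.List.mem_enumerate_iff _ _ _).1 hcc
      simp only [zero_add] at hx hc2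
      have hji : c = j := by exact_mod_cast hx
      subst hji
      refine ⟨sm[k], List.getElem_mem hk, ?_⟩
      simp [PySem.List.pyGet?_natCast, List.getElem?_eq_getElem hj, hc2]
  · rintro ⟨row, hrow, hval⟩
    obtain ⟨k, hk, rfl⟩ := List.mem_iff_getElem.1 hrow
    have hlen : c < sm[k].length := lt_of_lt_of_le hc (hrect _ (List.getElem_mem hk))
    rw [PySem.List.pyGet?_natCast] at hval
    simp only [List.getElem?_eq_getElem hlen, Option.getD_some] at hval
    refine Or.inr ⟨((k : Int), sm[k]), (PySem.List.mem_enumerate_iff _ _ _).2 ⟨k, hk, by simp⟩,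
      ((c : Int), sm[k][c]), (PySem.List.mem_enumerate_iff _ _ _).2 ⟨c, hlen, by simp⟩, hval, rfl⟩

-- ===== VERDICT (by name: the statement is the Claim_ definition above) =====
theorem expand_map_spec : Claim_equal_expand_map := by
  intro ef sm _hdom hpre
  obtain ⟨hne, hrect⟩ := hpre
  obtain ⟨r0, rest, rfl⟩ := List.exists_cons_of_ne_nil hne
  unfold Spec_expand_map expand_map expand_map_alt
  simp only [List.headD_cons] at hrect
  have h0 : PySem.List.pyGet? (r0 :: rest) 0 = some r0 := by
    simp [PySem.List.pyGet?, PySem.List.pyIdx?]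
  have hsets : ((PySem.List.enumerate (r0 :: rest)).foldl
      (fun s rp => (PySem.List.enumerate rp.2).foldl
        (fun s cc => if cc.2 == "#" then (PySem.Set.add s.1 rp.1, PySem.Set.add s.2 cc.1) else s) s)
      (PySem.Set.empty, PySem.Set.empty)) =
      pvOuter (PySem.List.enumerate (r0 :: rest)) (PySem.Set.empty, PySem.Set.empty) := rfl
  rw [h0]
  simp only [Option.getD_some, hsets]
  refine Prod.ext ?_ ?_
  · -- rows
    dsimp only
    rw [PySem.List.foldl_congr_mem _ _
        (fun acc row => acc ++ [if "#" ∈ row then (1 : Int) else ef]) _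
        (fun acc row _ => by
          by_cases h : "#" ∈ row
          · simp [h]
          · simp [h]),
      PySem.List.foldl_append_singleton_eq_map, PySem.List.pyRange_zero_natCast, List.map_map]
    simp only [List.nil_append]
    apply List.ext_getElem (by simp)
    intro i hi _
    have hi' : i < (r0 :: rest).length := by simpa using hi
    simp only [List.getElem_map, List.getElem_range, Function.comp_apply]
    set S := pvOuter (PySem.List.enumerate (r0 :: rest)) (PySem.Set.empty, PySem.Set.empty) with hS
    have hiff := S1_spec (r0 :: rest) i hi'
    rw [← hS] at hiff
    have hctm : PySem.Set.contains S.1 (i : Int) = true ↔ (i : Int) ∈ S.1 := by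
      simp [PySem.Set.contains]
    by_cases hm : "#" ∈ (r0 :: rest)[i]
    · rw [if_pos hm, if_pos (hctm.2 (hiff.2 hm))]
    · have hcf : ¬ (PySem.Set.contains S.1 (i : Int) = true) := fun h => hm (hiff.1 (hctm.1 h))
      rw [if_neg hm, if_neg hcf]
  · -- cols
    dsimp only
    rw [PySem.List.foldl_congr_mem _ _
        (fun acc col => acc ++ [if "#" ∈ (r0 :: rest).map (fun row => (PySem.List.pyGet? row col).getD "") then (1 : Int) else ef]) _
        (fun acc col _ => by
          beta_reduce
          by_cases h : "#" ∈ (r0 :: rest).map (fun row => (PySem.List.pyGet? row col).getD "")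
          · rw [if_neg (not_not_intro h), if_pos h]
          · rw [if_pos h, if_neg h]),
      PySem.List.foldl_append_singleton_eq_map]
    simp only [List.nil_append]
    apply List.map_congr_left
    intro col hcol
    obtain ⟨hcl, hcu⟩ := PySem.List.mem_pyRange_one.1 hcol
    obtain ⟨c, rfl⟩ := Int.eq_ofNat_of_zero_le hcl
    have hc : c < r0.length := by exact_mod_cast hcu
    set S := pvOuter (PySem.List.enumerate (r0 :: rest)) (PySem.Set.empty, PySem.Set.empty) with hS
    have hiff := S2_spec (r0 :: rest) r0.length hrect c hc
    rw [← hS] at hiff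
    have hctm : PySem.Set.contains S.2 (c : Int) = true ↔ (c : Int) ∈ S.2 := by
      simp [PySem.Set.contains]
    by_cases hm : "#" ∈ (r0 :: rest).map (fun row => (PySem.List.pyGet? row (c : Int)).getD "")
    · rw [if_pos hm, if_pos (hctm.2 (hiff.2 hm))]
    · have hcf : ¬ (PySem.Set.contains S.2 (c : Int) = true) := fun h => hm (hiff.1 (hctm.1 h))
      rw [if_neg hm, if_neg hcf]
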